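-- pv_equiv track=rewrite | github.com/issdandavis/SCBE-AETHERMOORE | src/symphonic_cipher/pqc/quasicrystal_auth.py | negabinary_to_balanced_ternary
-- ===== SOURCE A (Python) =====
-- from typing import Dict, List, Optional, Tuple
--
-- def negabinary_to_balanced_ternary(negabin_str: str) -> List[int]:
--     """Convert a negabinary string to balanced ternary trits.
--
--     Performs negabinary -> integer -> balanced ternary conversion.
--
--     Args:
--         negabin_str: MSB-first negabinary string (digits '0' and '1').
--
--     Returns:
--         List of trits in {-1, 0, +1}, MSB-first.  Returns [0] for zero.
--     """
--     if not negabin_str: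
--         return [0]
--
--     # Decode negabinary to integer
--     n: int = 0
--     for i, digit in enumerate(reversed(negabin_str)):
--         if digit == "1":
--             n += (-2) ** i
--
--     if n == 0:
--         return [0]
--
--     # Encode integer as balanced ternary (LSB-first, then reverse)
--     trits: List[int] = []
--     while n != 0:
--         remainder: int = n % 3
--         if remainder == 2:
--             trits.append(-1)
--             n = (n + 1) // 3
--         else:
--             trits.append(remainder)
--             n //= 3
--
--     return trits[::-1]
-- ===== SOURCE B (Python) =====
-- from typing import List
--
--
-- def _bt(n: int) -> List[int]:
--     """Balanced-ternary trits of n, MSB-first, built recursively ([] for 0).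
--
--     Branch-free digit rule: d = (n + 1) % 3 - 1 is the least trit of n,
--     and (n - d) is exactly divisible by 3.
--     """
--     if n == 0:
--         return []
--     d = (n + 1) % 3 - 1
--     return _bt((n - d) // 3) + [d]
--
--
-- def negabinary_to_balanced_ternary(negabin_str: str) -> List[int]:
--     n = 0
--     for c in negabin_str:
--         n = n * -2 + (c == "1")
--     return _bt(n) or [0]
-- ===== Notes on version B (the rewrite author's own statement) =====
-- stated objective: alternative
-- what changed: Decode negabinary by Horner's rule in one left-to-right pass (n = n*-2 + digit) instead of summing a freshly computed power (-2)**i per '1' of the reversed string, and encode balanced ternary with a branch-free recursive MSB-first builder using the digit formula d = (n+1)%3 - 1 and quotient (n-d)//3, instead of A's LSB-first append loop with a remainder==2 case split followed by a reversal.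
import Mathlib
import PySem

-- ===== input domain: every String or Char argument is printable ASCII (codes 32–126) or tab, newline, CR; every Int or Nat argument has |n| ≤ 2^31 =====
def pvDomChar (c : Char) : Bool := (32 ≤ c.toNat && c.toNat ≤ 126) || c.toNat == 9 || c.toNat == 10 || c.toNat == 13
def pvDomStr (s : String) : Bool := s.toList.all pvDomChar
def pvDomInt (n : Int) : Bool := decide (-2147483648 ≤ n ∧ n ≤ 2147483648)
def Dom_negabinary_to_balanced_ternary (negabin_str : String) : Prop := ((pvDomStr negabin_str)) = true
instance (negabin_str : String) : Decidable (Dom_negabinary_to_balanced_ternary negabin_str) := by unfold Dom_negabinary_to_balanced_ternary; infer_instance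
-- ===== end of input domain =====

-- B replaces A's per-digit power sum by one Horner pass (n = n*-2 + digit) and A's
-- LSB-first remainder==2/else encode loop + reversal by a branch-free recursive
-- MSB-first builder (d = (n+1)%3 - 1, next (n-d)//3); objective: alternative.

-- Termination facts, cited by the ports' decreasing_by.
theorem pvFdiv3_lt (n : Int) (_h : n ≠ 0) (h2 : PySem.Int.mod n 3 ≠ 2) :
    (PySem.Int.floordiv n 3).natAbs < n.natAbs := by
  have hq := PySem.Int.floordiv_mul_add_mod n 3
  have hr0 := PySem.Int.mod_nonneg n (b := 3) (by norm_num)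
  have hr3 := PySem.Int.mod_lt n (b := 3) (by norm_num)
  omega

theorem pvFdiv3_succ_lt (n : Int) (h : n ≠ 0) (h2 : PySem.Int.mod n 3 = 2) :
    (PySem.Int.floordiv (n + 1) 3).natAbs < n.natAbs := by
  have hq := PySem.Int.floordiv_mul_add_mod n 3
  have hq' := PySem.Int.floordiv_mul_add_mod (n + 1) 3
  have hr0 := PySem.Int.mod_nonneg (n + 1) (b := 3) (by norm_num)
  have hr3 := PySem.Int.mod_lt (n + 1) (b := 3) (by norm_num)
  omega

theorem pvBtStep_lt (n : Int) (h : n ≠ 0) :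
    (PySem.Int.floordiv (n - (PySem.Int.mod (n + 1) 3 - 1)) 3).natAbs < n.natAbs := by
  have hq1 := PySem.Int.floordiv_mul_add_mod (n + 1) 3
  have hm0 := PySem.Int.mod_nonneg (n + 1) (b := 3) (by norm_num)
  have hm3 := PySem.Int.mod_lt (n + 1) (b := 3) (by norm_num)
  have hq2 := PySem.Int.floordiv_mul_add_mod (n - (PySem.Int.mod (n + 1) 3 - 1)) 3
  have hr0 := PySem.Int.mod_nonneg (n - (PySem.Int.mod (n + 1) 3 - 1)) (b := 3) (by norm_num)
  have hr3 := PySem.Int.mod_lt (n - (PySem.Int.mod (n + 1) 3 - 1)) (b := 3) (by norm_num)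
  omega

-- ===== PORT A =====
-- A's while loop: append LSB-first into `trits`.
def pvEncA (n : Int) (trits : List Int) : List Int :=
  if h : n = 0 then trits
  else
    let r := PySem.Int.mod n 3
    if hr : r = 2 then pvEncA (PySem.Int.floordiv (n + 1) 3) (trits ++ [-1])
    else pvEncA (PySem.Int.floordiv n 3) (trits ++ [r])
termination_by n.natAbs
decreasing_by
  · exact pvFdiv3_succ_lt n h hr
  · exact pvFdiv3_lt n h hr

def negabinary_to_balanced_ternary (negabin_str : String) : List Int :=
  if negabin_str.toList = [] then [0]
  else
    -- for i, digit in enumerate(reversed(negabin_str)): if digit == "1": n += (-2) ** i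
    let n : Int := (PySem.List.enumerate negabin_str.toList.reverse 0).foldl
      (fun n p => if p.2 = '1' then n + (-2) ^ p.1.toNat else n) 0
    if n = 0 then [0]
    else (PySem.List.slice? (pvEncA n []) none none (-1)).getD []   -- trits[::-1]

-- ===== PORT B =====
-- B's branch-free recursive MSB-first balanced-ternary encoder ([] for 0).
def pvBt (n : Int) : List Int :=
  if h : n = 0 then []
  else
    let d := PySem.Int.mod (n + 1) 3 - 1
    pvBt (PySem.Int.floordiv (n - d) 3) ++ [d]
termination_by n.natAbs
decreasing_by
  exact pvBtStep_lt n h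

def negabinary_to_balanced_ternary_alt (negabin_str : String) : List Int :=
  let n : Int := negabin_str.toList.foldl
    (fun n c => n * (-2) + (if c = '1' then 1 else 0)) 0
  let t := pvBt n
  if t = [] then [0] else t   -- `_bt(n) or [0]`

-- ===== PRECONDITION & SPEC =====
def Spec_negabinary_to_balanced_ternary (negabin_str : String) (out : List Int) : Prop := out = negabinary_to_balanced_ternary_alt negabin_str
instance (negabin_str : String) (out : List Int) : Decidable (Spec_negabinary_to_balanced_ternary negabin_str out) := by unfold Spec_negabinary_to_balanced_ternary; infer_instance

-- ===== CLAIM (what is proved, stated in full; the proofs are below) =====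
def Claim_equal_negabinary_to_balanced_ternary : Prop := ∀ (negabin_str : String), Dom_negabinary_to_balanced_ternary negabin_str → Spec_negabinary_to_balanced_ternary negabin_str (negabinary_to_balanced_ternary negabin_str)

-- ===== LEMMAS AND PROOFS =====

-- Value of an LSB-first negabinary digit list.
def pvNegVal : List Char → Int
  | [] => 0
  | c :: t => (if c = '1' then 1 else 0) + (-2) * pvNegVal t

theorem pvDecA (l : List Char) (k : Nat) (acc : Int) :
    ((PySem.List.enumerate l (k : Int)).foldl
      (fun n p => if p.2 = '1' then n + (-2) ^ p.1.toNat else n) acc)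
    = acc + (-2) ^ k * pvNegVal l := by
  induction l generalizing k acc with
  | nil => simp [PySem.List.enumerate_nil, pvNegVal]
  | cons c t ih =>
    rw [PySem.List.enumerate_cons]
    have hk : ((k : Int) + 1) = ((k + 1 : Nat) : Int) := by push_cast; ring
    simp only [List.foldl_cons, hk, ih]
    by_cases hc : c = '1' <;> simp [hc, pvNegVal, pow_succ] <;> ring

theorem pvNegVal_append (xs : List Char) (c : Char) :
    pvNegVal (xs ++ [c]) = pvNegVal xs + (if c = '1' then 1 else 0) * (-2) ^ xs.length := by
  induction xs with
  | nil => simp [pvNegVal]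
  | cons x t ih =>
    simp only [List.cons_append, pvNegVal, ih, List.length_cons, pow_succ]
    by_cases hc : c = '1' <;> by_cases hx : x = '1' <;> simp [hc, hx] <;> ring

theorem pvHornerB (l : List Char) (acc : Int) :
    l.foldl (fun n c => n * (-2) + (if c = '1' then 1 else 0)) acc
    = acc * (-2) ^ l.length + pvNegVal l.reverse := by
  induction l generalizing acc with
  | nil => simp [pvNegVal]
  | cons c t ih =>
    simp only [List.foldl_cons, ih, List.reverse_cons, pvNegVal_append,
      List.length_reverse, List.length_cons, pow_succ]
    ring

-- LSB-first trit list of n (proof-side reference for both encoders).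
def pvLsb (n : Int) : List Int :=
  if h : n = 0 then []
  else
    let r := PySem.Int.mod n 3
    if hr : r = 2 then -1 :: pvLsb (PySem.Int.floordiv (n + 1) 3)
    else r :: pvLsb (PySem.Int.floordiv n 3)
termination_by n.natAbs
decreasing_by
  · exact pvFdiv3_succ_lt n h hr
  · exact pvFdiv3_lt n h hr

theorem pvEncA_eq (m : Nat) : ∀ n : Int, n.natAbs = m → ∀ trits, pvEncA n trits = trits ++ pvLsb n := by
  induction m using Nat.strong_induction_on with
  | _ m ih =>
    intro n hm trits
    rw [pvEncA, pvLsb]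
    by_cases h : n = 0
    · simp [h]
    · simp only [h, dif_neg, not_false_iff]
      by_cases hr : PySem.Int.mod n 3 = 2
      · simp only [hr, dif_pos]
        rw [ih _ (hm ▸ pvFdiv3_succ_lt n h hr) _ rfl]
        simp
      · simp only [hr, dif_neg, not_false_iff]
        rw [ih _ (hm ▸ pvFdiv3_lt n h hr) _ rfl]
        simp

theorem pvBt_eq (m : Nat) : ∀ n : Int, n.natAbs = m → pvBt n = (pvLsb n).reverse := by
  induction m using Nat.strong_induction_on with
  | _ m ih =>
    intro n hm
    rw [pvBt, pvLsb]
    by_cases h : n = 0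
    · simp [h]
    · simp only [h, dif_neg, not_false_iff]
      have hq := PySem.Int.floordiv_mul_add_mod n 3
      have hr0 := PySem.Int.mod_nonneg n (b := 3) (by norm_num)
      have hr3 := PySem.Int.mod_lt n (b := 3) (by norm_num)
      have hq1 := PySem.Int.floordiv_mul_add_mod (n + 1) 3
      have hm0 := PySem.Int.mod_nonneg (n + 1) (b := 3) (by norm_num)
      have hm3 := PySem.Int.mod_lt (n + 1) (b := 3) (by norm_num)
      have hrec := ih _ (hm ▸ pvBtStep_lt n h) _ rfl
      by_cases hr : PySem.Int.mod n 3 = 2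
      · have hd : PySem.Int.mod (n + 1) 3 - 1 = -1 := by omega
        simp only [hr, dif_pos, hd] at hrec ⊢
        rw [hrec]
        have harg : n - (-1 : Int) = n + 1 := by ring
        simp [harg]
      · have hd : PySem.Int.mod (n + 1) 3 - 1 = PySem.Int.mod n 3 := by omega
        have hq2 := PySem.Int.floordiv_mul_add_mod (n - PySem.Int.mod n 3) 3
        have hs0 := PySem.Int.mod_nonneg (n - PySem.Int.mod n 3) (b := 3) (by norm_num)
        have hs3 := PySem.Int.mod_lt (n - PySem.Int.mod n 3) (b := 3) (by norm_num)
        have harg : PySem.Int.floordiv (n - PySem.Int.mod n 3) 3 = PySem.Int.floordiv n 3 := by omega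
        simp only [hr, dif_neg, not_false_iff, hd, harg] at hrec ⊢
        rw [hrec]
        simp

-- ===== VERDICT (by name: the statement is the Claim_ definition above) =====
theorem negabinary_to_balanced_ternary_spec : Claim_equal_negabinary_to_balanced_ternary := by
  intro s _
  unfold Spec_negabinary_to_balanced_ternary
  unfold negabinary_to_balanced_ternary negabinary_to_balanced_ternary_alt
  have hA : ((PySem.List.enumerate s.toList.reverse 0).foldl
      (fun n p => if p.2 = '1' then n + (-2) ^ p.1.toNat else n) 0)
      = pvNegVal s.toList.reverse := by
    have := pvDecA s.toList.reverse 0 0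
    simpa using this
  have hB : (s.toList.foldl (fun n c => n * (-2) + (if c = '1' then 1 else 0)) 0)
      = pvNegVal s.toList.reverse := by
    simpa using pvHornerB s.toList 0
  simp only [hA, hB]
  by_cases he : s.toList = []
  · simp [he, pvNegVal, pvBt]
  · simp only [he, if_neg, not_false_iff]
    set v := pvNegVal s.toList.reverse with hv
    by_cases h0 : v = 0
    · simp [h0, pvBt]
    · have hbt : pvBt v = (pvLsb v).reverse := pvBt_eq _ _ rfl
      have hne : pvLsb v ≠ [] := by rw [pvLsb]; simp only [h0, dif_neg, not_false_iff]; split <;> simp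
      simp only [h0, if_neg, not_false_iff]
      rw [pvEncA_eq _ _ rfl, PySem.List.slice?_none_none_neg_one, hbt]
      simp [hne]
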